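-- pv_equiv track=rewrite | github.com/aorursy/KT_dataset_py | tduque_codecoverletter.py | join_list_in_text
-- ===== SOURCE A (Python) =====
-- def join_list_in_text(text, listed_values, append_punctuation=False):
--
--     for num, part_text in enumerate(listed_values):
--
--         text += part_text
--
--         if num < len(listed_values)-2:
--
--             text += ", "
--
--         elif num < len(listed_values)-1:
--
--             text += " and "
--
--         elif append_punctuation==True:
--
--             text += ". "
--
--     return text
-- ===== SOURCE B (Python) =====
-- def join_list_in_text(text, listed_values, append_punctuation=False):
--     if not listed_values:
--         return text
--     if len(listed_values) > 1:
--         body = ", ".join(listed_values[:-1]) + " and " + listed_values[-1]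
--     else:
--         body = listed_values[-1]
--     out = text + body
--     if append_punctuation == True:
--         out += ". "
--     return out
-- ===== Notes on version B (the rewrite author's own statement) =====
-- stated objective: idiomatic
-- what changed: Replaced the enumerate loop that picks a separator by comparing each index against len-2/len-1 with a structural build: ', '.join over the slice of all but the last element, ' and ' plus the last element, and the optional '. ' appended once at the end.
import Mathlib
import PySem

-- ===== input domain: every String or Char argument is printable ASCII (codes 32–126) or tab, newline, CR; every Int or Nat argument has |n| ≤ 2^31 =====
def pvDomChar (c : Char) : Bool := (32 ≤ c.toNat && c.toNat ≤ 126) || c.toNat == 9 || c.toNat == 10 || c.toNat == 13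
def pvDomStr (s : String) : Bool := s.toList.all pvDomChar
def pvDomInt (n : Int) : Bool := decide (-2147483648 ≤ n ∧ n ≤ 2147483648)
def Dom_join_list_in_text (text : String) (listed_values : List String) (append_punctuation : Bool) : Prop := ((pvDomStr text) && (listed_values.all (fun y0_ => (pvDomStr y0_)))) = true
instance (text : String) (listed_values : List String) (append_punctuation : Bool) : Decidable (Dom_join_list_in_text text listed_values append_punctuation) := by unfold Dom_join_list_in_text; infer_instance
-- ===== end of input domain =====

-- B builds the sentence structurally (join over all-but-last, " and " + last, one final ". ") instead of A's per-index separator choice inside an enumerate loop; same return value, no side effects.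


-- ===== PORT A =====
-- literal port of A's enumerate loop: per element, index-compared separator choice
def join_list_in_text (text : String) (listed_values : List String) (append_punctuation : Bool) : String :=
  (PySem.List.enumerate listed_values).foldl
    (fun t p =>
      let t := t ++ p.2
      if p.1 < (listed_values.length : Int) - 2 then t ++ ", "
      else if p.1 < (listed_values.length : Int) - 1 then t ++ " and "
      else if append_punctuation = true then t ++ ". "
      else t)
    text

-- ===== PORT B =====
-- literal port of Source B: lv[:-1] = dropLast, lv[-1] = getLast! (guarded non-empty), ", ".join = PySem.Str.join
def join_list_in_text_alt (text : String) (listed_values : List String) (append_punctuation : Bool) : String :=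
  match listed_values with
  | [] => text
  | x :: xs =>
    let body :=
      if (x :: xs).length > 1 then
        PySem.Str.join ", " ((x :: xs).dropLast) ++ " and " ++ (x :: xs).getLast!
      else
        (x :: xs).getLast!
    let out := text ++ body
    if append_punctuation = true then out ++ ". " else out

-- ===== PRECONDITION & SPEC =====
def Spec_join_list_in_text (text : String) (listed_values : List String) (append_punctuation : Bool) (out : String) : Prop := out = join_list_in_text_alt text listed_values append_punctuation
instance (text : String) (listed_values : List String) (append_punctuation : Bool) (out : String) : Decidable (Spec_join_list_in_text text listed_values append_punctuation out) := by unfold Spec_join_list_in_text; infer_instance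

-- ===== CLAIM (what is proved, stated in full; the proofs are below) =====
def Claim_equal_join_list_in_text : Prop := ∀ (text : String) (listed_values : List String) (append_punctuation : Bool), Dom_join_list_in_text text listed_values append_punctuation → Spec_join_list_in_text text listed_values append_punctuation (join_list_in_text text listed_values append_punctuation)

-- ===== LEMMAS AND PROOFS =====

-- the sentence body both programs produce, without the final punctuation
def pvCore : List String → String
  | [] => ""
  | [a] => a
  | a :: rest => a ++ (if rest.length ≥ 2 then ", " else " and ") ++ pvCore rest

theorem pvJoin_cons_cons (a b : String) (l : List String) :
    PySem.Str.join ", " (a :: b :: l) = a ++ ", " ++ PySem.Str.join ", " (b :: l) := by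
  apply String.toList_injective
  simp [PySem.Str.toList_join, PySem.Chars.join_cons_cons]

theorem pvJoin_singleton (a : String) : PySem.Str.join ", " [a] = a := by
  apply String.toList_injective
  simp [PySem.Str.toList_join, PySem.Chars.join_singleton]

-- A's fold over enumerate from any start, total length fixed
theorem pvA_fold (ap : Bool) (total : Nat) :
    ∀ (l : List String) (n : Nat) (t : String), n + l.length = total →
    (PySem.List.enumerate l (n : Int)).foldl
      (fun t p =>
        let t := t ++ p.2
        if p.1 < (total : Int) - 2 then t ++ ", "
        else if p.1 < (total : Int) - 1 then t ++ " and "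
        else if ap = true then t ++ ". "
        else t) t
    = t ++ pvCore l ++ (if l ≠ [] ∧ ap = true then ". " else "") := by
  intro l
  induction l with
  | nil => intro n t h; simp [PySem.List.enumerate, pvCore]
  | cons a l ih =>
    intro n t h
    simp only [List.length_cons] at h
    rw [PySem.List.enumerate_cons]
    simp only [List.foldl_cons]
    have hc : ((n : Int)) + 1 = (((n + 1 : Nat)) : Int) := by push_cast; ring
    cases l with
    | nil =>
      simp only [List.length_nil] at h
      have h1 : ¬ ((n : Int) < (total : Int) - 2) := by omega
      have h2 : ¬ ((n : Int) < (total : Int) - 1) := by omega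
      by_cases hap : ap = true <;>
        simp [PySem.List.enumerate, h1, h2, hap, pvCore, String.append_assoc]
    | cons b l' =>
      cases l' with
      | nil =>
        have h1 : ¬ ((n : Int) < (total : Int) - 2) := by
          simp only [List.length_cons, List.length_nil] at h; omega
        have h2 : (n : Int) < (total : Int) - 1 := by
          simp only [List.length_cons, List.length_nil] at h; omega
        simp only [if_neg h1, if_pos h2]
        rw [hc, ih (n + 1) (t ++ a ++ " and ") (by simpa using h.symm ▸ rfl)]
        simp [pvCore, String.append_assoc]
      | cons c l'' =>
        have h1 : (n : Int) < (total : Int) - 2 := by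
          simp only [List.length_cons] at h; omega
        simp only [if_pos h1]
        rw [hc, ih (n + 1) (t ++ a ++ ", ") (by omega)]
        simp [pvCore, String.append_assoc]

theorem pvB_body (x : String) (xs : List String) :
    (if (x :: xs).length > 1 then
        PySem.Str.join ", " ((x :: xs).dropLast) ++ " and " ++ (x :: xs).getLast!
      else (x :: xs).getLast!) = pvCore (x :: xs) := by
  induction xs generalizing x with
  | nil => simp [pvCore]
  | cons y ys ih =>
    cases ys with
    | nil => simp [pvCore, pvJoin_singleton, String.append_assoc]
    | cons z zs =>
      have hy := ih y
      have hgt : (y :: z :: zs).length > 1 := by simp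
      rw [if_pos hgt] at hy
      have hd : (x :: y :: z :: zs).dropLast = x :: (y :: z :: zs).dropLast := rfl
      have hdc : ∃ w ws, (y :: z :: zs).dropLast = w :: ws := ⟨y, (z :: zs).dropLast, rfl⟩
      obtain ⟨w, ws, hw⟩ := hdc
      simp only [List.length_cons, hd, hw, pvJoin_cons_cons, gt_iff_lt] at *
      rw [if_pos (by omega)]
      have hlast : (x :: y :: z :: zs).getLast! = (y :: z :: zs).getLast! := rfl
      rw [hlast, String.append_assoc, String.append_assoc]
      have : pvCore (x :: y :: z :: zs) = x ++ ", " ++ pvCore (y :: z :: zs) := by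
        simp [pvCore]
      rw [this, ← hy]
      simp [String.append_assoc]

-- ===== VERDICT (by name: the statement is the Claim_ definition above) =====
theorem join_list_in_text_spec : Claim_equal_join_list_in_text := by
  intro text lv ap _
  unfold Spec_join_list_in_text join_list_in_text join_list_in_text_alt
  cases lv with
  | nil => simp [PySem.List.enumerate]
  | cons x xs =>
    rw [show ((0:Int)) = ((0:Nat):Int) by norm_num] at *
    have h := pvA_fold ap (x :: xs).length (x :: xs) 0 text (by simp)
    rw [h]
    dsimp only
    rw [pvB_body]
    by_cases hap : ap = true <;> simp [hap, String.append_assoc]
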